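-- pv_equiv track=rewrite | github.com/paulklemstine/factor | lean/demo/Pythagorean/higher_dim_factoring_demo.py | find_quadruples
-- ===== SOURCE A (Python) =====
-- from math import gcd, isqrt, sqrt
--
-- def find_quadruples(d_max=50):
--     """Find all Pythagorean quadruples a²+b²+c²=d² with d ≤ d_max."""
--     quads = []
--     for d in range(1, d_max + 1):
--         for a in range(0, d):
--             for b in range(a, d):
--                 rem = d * d - a * a - b * b
--                 if rem < 0:
--                     break
--                 c = isqrt(rem)
--                 if c >= b and c * c == rem:
--                     quads.append((a, b, c, d))
--     return quads
-- ===== SOURCE B (Python) =====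
-- def find_quadruples(d_max=50):
--     """Find all Pythagorean quadruples a²+b²+c²=d² with d ≤ d_max."""
--     sums = {}
--     for b in range(0, d_max):
--         bb = b * b
--         for c in range(b, d_max + 1):
--             sums.setdefault(bb + c * c, []).append((b, c))
--     quads = []
--     for d in range(1, d_max + 1):
--         dd = d * d
--         for a in range(0, d):
--             for b, c in sums.get(dd - a * a, []):
--                 if b >= a:
--                     quads.append((a, b, c, d))
--     return quads
-- ===== Notes on version B (the rewrite author's own statement) =====
-- stated objective: faster
-- what changed: Instead of scanning b for every (d,a) and testing isqrt per step (triple loop), B precomputes one dict mapping each sum b²+c² (0≤b≤c≤d_max) to its (b,c) pairs and, per (d,a), looks up d²-a² directly.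
import Mathlib
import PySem

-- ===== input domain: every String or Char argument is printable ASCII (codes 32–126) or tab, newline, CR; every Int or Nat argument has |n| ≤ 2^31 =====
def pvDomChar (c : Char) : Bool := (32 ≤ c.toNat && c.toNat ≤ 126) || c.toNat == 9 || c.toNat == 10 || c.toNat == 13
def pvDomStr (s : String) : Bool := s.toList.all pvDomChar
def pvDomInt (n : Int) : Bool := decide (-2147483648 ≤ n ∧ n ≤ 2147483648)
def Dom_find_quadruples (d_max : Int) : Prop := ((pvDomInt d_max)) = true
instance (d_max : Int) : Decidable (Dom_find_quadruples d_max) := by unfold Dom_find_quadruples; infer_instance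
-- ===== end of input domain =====

-- B replaces A's per-(d,a) scan over b by one precomputed dict from b²+c² to its (b,c) pair lists; measured faster at the tested sizes.


-- ===== PORT A =====
-- math.isqrt(n) for n ≥ 0 (A only calls it with rem ≥ 0); exact there: floor square root.
def pyIsqrt (n : Int) : Int := (Nat.sqrt n.toNat : Int)

-- A's 'for b in range(a, d)' loop, with its 'break' on rem < 0
def innerA (a d : Int) : List Int → List (List Int) → List (List Int)
  | [], quads => quads
  | b :: bs, quads =>
    let rem := d * d - a * a - b * b
    if rem < 0 then quads
    else
      let c := pyIsqrt rem
      innerA a d bs (if c ≥ b && c * c == rem then quads ++ [[a, b, c, d]] else quads)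

def find_quadruples (d_max : Int) : List (List Int) :=
  (PySem.List.pyRange 1 (d_max + 1) 1).foldl (fun quads d =>
    (PySem.List.pyRange 0 d 1).foldl (fun quads a =>
      innerA a d (PySem.List.pyRange a d 1) quads) quads) []

-- ===== PORT B =====
-- sums = {}; for b in range(0, d_max): for c in range(b, d_max+1): sums.setdefault(b*b+c*c, []).append((b, c))
def sumsDict (d_max : Int) : PySem.Dict Int (List (Int × Int)) :=
  (PySem.List.pyRange 0 d_max 1).foldl (fun s b =>
    (PySem.List.pyRange b (d_max + 1) 1).foldl (fun s c =>
      s.modify (b * b + c * c) [] (· ++ [(b, c)])) s) PySem.Dict.empty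

def find_quadruples_alt (d_max : Int) : List (List Int) :=
  let sums := sumsDict d_max
  (PySem.List.pyRange 1 (d_max + 1) 1).foldl (fun quads d =>
    (PySem.List.pyRange 0 d 1).foldl (fun quads a =>
      (sums.getD (d * d - a * a) []).foldl (fun quads p =>
        if p.1 ≥ a then quads ++ [[a, p.1, p.2, d]] else quads) quads) quads) []

-- ===== PRECONDITION & SPEC =====
def Spec_find_quadruples (d_max : Int) (out : List (List Int)) : Prop := out = find_quadruples_alt d_max
instance (d_max : Int) (out : List (List Int)) : Decidable (Spec_find_quadruples d_max out) := by unfold Spec_find_quadruples; infer_instance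

-- ===== CLAIM (what is proved, stated in full; the proofs are below) =====
def Claim_equal_find_quadruples : Prop := ∀ (d_max : Int), Dom_find_quadruples d_max → Spec_find_quadruples d_max (find_quadruples d_max)

-- ===== LEMMAS AND PROOFS =====
def allPairs (d_max : Int) : List (Int × Int) :=
  (PySem.List.pyRange 0 d_max 1).flatMap (fun b =>
    (PySem.List.pyRange b (d_max + 1) 1).map (fun c => (b, c)))

theorem pyIsqrt_of_sq (c : Int) (hc : 0 ≤ c) : pyIsqrt (c * c) = c := by
  unfold pyIsqrt
  rw [Int.toNat_mul hc hc, ← Nat.pow_two, Nat.sqrt_eq', Int.toNat_of_nonneg hc]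

theorem bucket_eq (d_max t : Int) :
    (sumsDict d_max).getD t [] =
      (allPairs d_max).filter (fun p => p.1 * p.1 + p.2 * p.2 == t) := by
  have h1 : sumsDict d_max =
      ((allPairs d_max).map (fun p => (p.1 * p.1 + p.2 * p.2, p))).foldl
        (fun s q => s.modify q.1 [] (· ++ [q.2])) PySem.Dict.empty := by
    unfold sumsDict allPairs
    rw [List.foldl_map, List.foldl_flatMap]
    simp only [List.foldl_map]
  rw [h1, PySem.Dict.getD_foldl_modify_append, List.filter_map]
  simp [Function.comp_def]

theorem filter_sq (r lo hi : Int) (hlo : 0 ≤ lo) :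
    (PySem.List.pyRange lo hi 1).filter (fun c => c * c == r) =
      if 0 ≤ r ∧ pyIsqrt r * pyIsqrt r = r ∧ lo ≤ pyIsqrt r ∧ pyIsqrt r < hi
      then [pyIsqrt r] else [] := by
  split_ifs with h
  · obtain ⟨hr, hsq, hlos, hshi⟩ := h
    have hcong : ∀ c ∈ PySem.List.pyRange lo hi 1,
        ((c * c == r) = (c == pyIsqrt r)) := by
      intro c hc
      rw [PySem.List.mem_pyRange_one] at hc
      have hc0 : 0 ≤ c := le_trans hlo hc.1
      have hiff : (c * c = r) ↔ (c = pyIsqrt r) :=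
        ⟨fun hcc => by rw [← hcc, pyIsqrt_of_sq c hc0],
         fun he2 => by rw [he2, hsq]⟩
      exact decide_eq_decide.mpr hiff
    rw [List.filter_congr hcong, List.filter_beq]
    have hmem : pyIsqrt r ∈ PySem.List.pyRange lo hi 1 := by
      rw [PySem.List.mem_pyRange_one]; exact ⟨hlos, hshi⟩
    rw [List.count_eq_one_of_mem (PySem.List.nodup_pyRange_one _ _) hmem]
    rfl
  · rw [List.filter_eq_nil_iff]
    intro c hc
    rw [PySem.List.mem_pyRange_one] at hc
    have hc0 : 0 ≤ c := le_trans hlo hc.1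
    simp only [beq_iff_eq]
    intro hcc
    apply h
    have : pyIsqrt r = c := by rw [← hcc, pyIsqrt_of_sq c hc0]
    refine ⟨by rw [← hcc]; positivity, by rw [this]; exact hcc, by omega, by omega⟩

def hit (a d b : Int) : List (Int × Int) :=
  if 0 ≤ d * d - a * a - b * b ∧
      pyIsqrt (d * d - a * a - b * b) * pyIsqrt (d * d - a * a - b * b) = d * d - a * a - b * b ∧
      b ≤ pyIsqrt (d * d - a * a - b * b)
  then [(b, pyIsqrt (d * d - a * a - b * b))] else []

-- per-column description of the filtered pair list
theorem column_eq (d_max d a b : Int) (hd1 : 1 ≤ d) (hdm : d ≤ d_max)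
    (ha0 : 0 ≤ a) (hab : a ≤ b) :
    ((PySem.List.pyRange b (d_max + 1) 1).map (fun c => (b, c))).filter
        (fun p => decide (a ≤ p.1) && (p.1 * p.1 + p.2 * p.2 == d * d - a * a)) =
      hit a d b := by
  rw [List.filter_map]
  have hb0 : 0 ≤ b := le_trans ha0 hab
  have hcong : ∀ c ∈ PySem.List.pyRange b (d_max + 1) 1,
      ((fun p => decide (a ≤ p.1) && (p.1 * p.1 + p.2 * p.2 == d * d - a * a)) ∘
        (fun c => (b, c))) c = (c * c == d * d - a * a - b * b) := by
    intro c _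
    simp only [Function.comp_apply]
    have hd : decide (a ≤ b) = true := by simp [hab]
    rw [hd, Bool.true_and]
    exact decide_eq_decide.mpr ⟨fun h => by omega, fun h => by omega⟩
  rw [List.filter_congr hcong, filter_sq _ _ _ hb0]
  unfold hit
  set rem := d * d - a * a - b * b with hrem
  set s := pyIsqrt rem with hs
  have hs0 : 0 ≤ s := by simp [hs, pyIsqrt]
  by_cases h : 0 ≤ rem ∧ s * s = rem ∧ b ≤ s
  · have hsd : s < d_max + 1 := by nlinarith [h.2.1, h.1]
    rw [if_pos ⟨h.1, h.2.1, h.2.2, hsd⟩, if_pos h]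
    rfl
  · rw [if_neg (by intro hh; exact h ⟨hh.1, hh.2.1, hh.2.2.1⟩), if_neg h]
    rfl

theorem hit_eq_nil (a d b : Int) (hd1 : 1 ≤ d) (hdb : d ≤ b) : hit a d b = [] := by
  unfold hit
  rw [if_neg]
  intro ⟨h1, h2, h3⟩
  have hs0 : 0 ≤ pyIsqrt (d * d - a * a - b * b) := by simp [pyIsqrt]
  nlinarith

theorem bucket_filter_eq (d_max d a : Int) (hd1 : 1 ≤ d) (hdm : d ≤ d_max)
    (ha0 : 0 ≤ a) (had : a < d) :
    ((allPairs d_max).filter (fun p => p.1 * p.1 + p.2 * p.2 == d * d - a * a)).filter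
        (fun p => decide (a ≤ p.1)) =
      (PySem.List.pyRange a d 1).flatMap (hit a d) := by
  rw [List.filter_filter]
  unfold allPairs
  rw [List.filter_flatMap]
  have hstep : ∀ b ∈ PySem.List.pyRange 0 d_max 1,
      ((PySem.List.pyRange b (d_max + 1) 1).map (fun c => (b, c))).filter
          (fun p => decide (a ≤ p.1) && (p.1 * p.1 + p.2 * p.2 == d * d - a * a)) =
        if a ≤ b then hit a d b else [] := by
    intro b hb
    rw [PySem.List.mem_pyRange_one] at hb
    split_ifs with hab
    · exact column_eq d_max d a b hd1 hdm ha0 hab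
    · rw [List.filter_map, List.filter_eq_nil_iff.mpr, List.map_nil]
      intro c _
      simp [hab]
  rw [List.flatMap_congr hstep]
  rw [PySem.List.pyRange_one_append 0 a d_max ha0 (by omega), List.flatMap_append]
  have h0a : (PySem.List.pyRange 0 a 1).flatMap (fun b => if a ≤ b then hit a d b else []) = [] := by
    rw [List.flatMap_eq_nil_iff]
    intro b hb
    rw [PySem.List.mem_pyRange_one] at hb
    rw [if_neg (by omega)]
  rw [h0a, List.nil_append]
  rw [PySem.List.pyRange_one_append a d d_max (by omega) hdm, List.flatMap_append]
  have hdd : (PySem.List.pyRange d d_max 1).flatMap (fun b => if a ≤ b then hit a d b else []) = [] := by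
    rw [List.flatMap_eq_nil_iff]
    intro b hb
    rw [PySem.List.mem_pyRange_one] at hb
    rw [if_pos (by omega), hit_eq_nil a d b hd1 (by omega)]
  rw [hdd, List.append_nil]
  apply List.flatMap_congr
  intro b hb
  rw [PySem.List.mem_pyRange_one] at hb
  rw [if_pos (by omega)]


theorem innerA_eq (a d : Int) (bs : List Int) (quads : List (List Int))
    (hmono : bs.Pairwise (· < ·)) (hnn : ∀ b ∈ bs, 0 ≤ b) :
    innerA a d bs quads =
      quads ++ (bs.flatMap (hit a d)).map (fun p => [a, p.1, p.2, d]) := by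
  induction bs generalizing quads with
  | nil => simp [innerA]
  | cons b bs ih =>
    have hb0 : 0 ≤ b := hnn b (by simp)
    rw [List.pairwise_cons] at hmono
    unfold innerA
    simp only []
    split_ifs with hrem
    · have hnil : (b :: bs).flatMap (hit a d) = [] := by
        rw [List.flatMap_eq_nil_iff]
        intro b' hb'
        have hbb' : b ≤ b' := by
          rcases List.mem_cons.mp hb' with h | h
          · omega
          · exact le_of_lt (hmono.1 b' h)
        unfold hit
        rw [if_neg]
        intro ⟨h1, _, _⟩
        nlinarith
      rw [hnil]; simp
    · -- append branch taken
      rename_i hc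
      rw [ih _ hmono.2 (fun x hx => hnn x (by simp [hx]))]
      simp only [Bool.and_eq_true, decide_eq_true_eq, ge_iff_le, beq_iff_eq] at hc
      have hhit : hit a d b = [(b, pyIsqrt (d * d - a * a - b * b))] := by
        unfold hit; rw [if_pos ⟨by omega, hc.2, hc.1⟩]
      rw [List.flatMap_cons, hhit]
      simp
    · rename_i hc
      rw [ih _ hmono.2 (fun x hx => hnn x (by simp [hx]))]
      simp only [Bool.and_eq_true, decide_eq_true_eq, ge_iff_le, beq_iff_eq, not_and] at hc
      have hhit : hit a d b = [] := by
        unfold hit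
        rw [if_neg]
        intro ⟨h1, h2, h3⟩
        exact hc h3 h2
      rw [List.flatMap_cons, hhit]
      simp


theorem inner_agree (d_max d a : Int) (hd1 : 1 ≤ d) (hdm : d ≤ d_max)
    (ha0 : 0 ≤ a) (had : a < d) (quads : List (List Int)) :
    innerA a d (PySem.List.pyRange a d 1) quads =
      ((sumsDict d_max).getD (d * d - a * a) []).foldl (fun quads p =>
        if p.1 ≥ a then quads ++ [[a, p.1, p.2, d]] else quads) quads := by
  rw [PySem.List.foldl_append_ite (p := fun p : Int × Int => p.1 ≥ a)
        (f := fun p : Int × Int => [a, p.1, p.2, d])]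
  rw [bucket_eq, innerA_eq a d _ quads (PySem.List.pairwise_lt_pyRange_one a d)
        (fun b hb => by rw [PySem.List.mem_pyRange_one] at hb; omega)]
  congr 1
  rw [show (fun p : Int × Int => decide (p.1 ≥ a)) = (fun p : Int × Int => decide (a ≤ p.1)) from rfl]
  rw [bucket_filter_eq d_max d a hd1 hdm ha0 had]

theorem ports_agree (d_max : Int) : find_quadruples d_max = find_quadruples_alt d_max := by
  unfold find_quadruples find_quadruples_alt
  apply PySem.List.foldl_congr_mem
  intro quads d hd
  rw [PySem.List.mem_pyRange_one] at hd
  apply PySem.List.foldl_congr_mem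
  intro quads a ha
  rw [PySem.List.mem_pyRange_one] at ha
  exact inner_agree d_max d a (by omega) (by omega) (by omega) (by omega) quads

-- ===== VERDICT (by name: the statement is the Claim_ definition above) =====
theorem find_quadruples_spec : Claim_equal_find_quadruples := by
  intro d_max _
  unfold Spec_find_quadruples
  exact ports_agree d_max
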